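-- pv_equiv track=rewrite | github.com/dragon198466ani/Safescoring.io | src/core/config.py | get_sambanova_keys
-- ===== SOURCE A (Python) =====
-- def get_sambanova_keys(config):
--     """Extract all SambaNova API keys from config (SAMBANOVA_API_KEY, SAMBANOVA_API_KEY_2, etc.)"""
--     keys = []
--
--     # Check main key (UUID format)
--     main_key = config.get('SAMBANOVA_API_KEY', '')
--     if main_key and len(main_key) >= 32:  # UUID format
--         keys.append(main_key)
--
--     # Check numbered keys
--     for i in range(2, 30):  # Support up to 30 keys (user has 24!)
--         key = config.get(f'SAMBANOVA_API_KEY_{i}', '')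
--         if key and len(key) >= 32 and key not in keys:
--             keys.append(key)
--
--     return keys
-- ===== SOURCE B (Python) =====
-- _SLOT = {'SAMBANOVA_API_KEY': 0}
-- for _i in range(2, 30):
--     _SLOT['SAMBANOVA_API_KEY_%d' % _i] = _i
--
--
-- def get_sambanova_keys(config):
--     """Extract all SambaNova API keys from config (SAMBANOVA_API_KEY, SAMBANOVA_API_KEY_2, etc.)"""
--     # Single pass over the config: route each recognised key name to its slot
--     # (setdefault: the first entry seen for a name wins, like a dict lookup).
--     found = {}
--     for name, value in config.items():
--         slot = _SLOT.get(name)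
--         if slot is not None:
--             found.setdefault(slot, value)
--     # Read the slots in order, keep plausible keys, drop duplicate values.
--     out, seen = [], set()
--     for slot in range(30):
--         value = found.get(slot, '')
--         if value and len(value) >= 32 and value not in seen:
--             seen.add(value)
--             out.append(value)
--     return out
-- ===== Notes on version B (the rewrite author's own statement) =====
-- stated objective: alternative
-- what changed: B inverts the traversal: instead of A's loop over the 29 candidate key names each doing a config lookup, B makes one pass over the config entries routing each recognised name through a precomputed name-to-slot index (first entry per name wins), then reads the slots out in order with a filter-and-dedup pass.
import Mathlib
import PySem

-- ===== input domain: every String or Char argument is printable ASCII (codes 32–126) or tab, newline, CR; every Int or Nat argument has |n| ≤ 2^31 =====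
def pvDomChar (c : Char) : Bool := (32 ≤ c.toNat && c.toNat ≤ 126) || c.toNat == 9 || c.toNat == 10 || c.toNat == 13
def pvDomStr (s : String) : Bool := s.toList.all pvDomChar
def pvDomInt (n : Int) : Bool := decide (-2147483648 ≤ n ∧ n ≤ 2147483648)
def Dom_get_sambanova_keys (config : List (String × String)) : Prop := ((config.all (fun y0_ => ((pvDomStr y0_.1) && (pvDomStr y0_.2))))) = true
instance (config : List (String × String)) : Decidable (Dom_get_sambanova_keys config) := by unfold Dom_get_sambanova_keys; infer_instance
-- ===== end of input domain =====

-- B inverts the traversal: one pass over the config entries routed through a precomputed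
-- name→slot index (first entry per name wins), then a slot-readout/dedup pass; same return value.

-- ===== PORT A =====
def get_sambanova_keys (config : List (String × String)) : List String :=
  let keys : List String := []
  let main_key := (PySem.Dict.mk config).getD "SAMBANOVA_API_KEY" ""
  let keys := if main_key ≠ "" ∧ 32 ≤ PySem.Str.len main_key then keys ++ [main_key] else keys
  (PySem.List.pyRange 2 30 1).foldl (fun keys i =>
    let key := (PySem.Dict.mk config).getD ("SAMBANOVA_API_KEY_" ++ PySem.Int.toStr i) ""
    if key ≠ "" ∧ 32 ≤ PySem.Str.len key ∧ key ∉ keys then keys ++ [key] else keys) keys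

-- ===== PORT B =====
-- the module-level _SLOT table of Source B (built by the same insert loop)
def pvSlotTable : PySem.Dict String Int :=
  (PySem.List.pyRange 2 30 1).foldl
    (fun d i => d.insert ("SAMBANOVA_API_KEY_" ++ PySem.Int.toStr i) i)
    (PySem.Dict.mk [("SAMBANOVA_API_KEY", (0 : Int))])

-- body of Source B's first loop: route one config entry to its slot (setdefault: first wins)
def pvRoute (found : PySem.Dict Int String) (kv : String × String) : PySem.Dict Int String :=
  match pvSlotTable.get? kv.1 with
  | some slot => found.setdefault slot kv.2
  | none => found

def get_sambanova_keys_alt (config : List (String × String)) : List String :=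
  let found : PySem.Dict Int String := config.foldl pvRoute PySem.Dict.empty
  ((PySem.List.pyRange 0 30 1).foldl (fun acc slot =>
      let value := found.getD slot ""
      if value ≠ "" ∧ 32 ≤ PySem.Str.len value ∧ PySem.Set.contains acc.2 value = false
      then (acc.1 ++ [value], PySem.Set.add acc.2 value) else acc)
    (([] : List String), PySem.Set.empty)).1

-- ===== PRECONDITION & SPEC =====
def Spec_get_sambanova_keys (config : List (String × String)) (out : List String) : Prop := out = get_sambanova_keys_alt config
instance (config : List (String × String)) (out : List String) : Decidable (Spec_get_sambanova_keys config out) := by unfold Spec_get_sambanova_keys; infer_instance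

-- ===== CLAIM (what is proved, stated in full; the proofs are below) =====
def Claim_equal_get_sambanova_keys : Prop := ∀ (config : List (String × String)), Dom_get_sambanova_keys config → Spec_get_sambanova_keys config (get_sambanova_keys config)

-- ===== LEMMAS AND PROOFS =====

-- the key name A queries for slot i (i = 0 is the main key)
def pvName (i : Int) : String :=
  if i = 0 then "SAMBANOVA_API_KEY" else "SAMBANOVA_API_KEY_" ++ PySem.Int.toStr i

-- A's conditional-append step / B's out-seen step, on the fetched value
def pvA (keys : List String) (v : String) : List String :=
  if v ≠ "" ∧ 32 ≤ PySem.Str.len v ∧ v ∉ keys then keys ++ [v] else keys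

def pvB (acc : List String × List String) (v : String) : List String × List String :=
  if v ≠ "" ∧ 32 ≤ PySem.Str.len v ∧ PySem.Set.contains acc.2 v = false
  then (acc.1 ++ [v], PySem.Set.add acc.2 v) else acc

theorem pv_slotTable_items :
    pvSlotTable.items =
      [("SAMBANOVA_API_KEY", 0), ("SAMBANOVA_API_KEY_2", 2), ("SAMBANOVA_API_KEY_3", 3),
       ("SAMBANOVA_API_KEY_4", 4), ("SAMBANOVA_API_KEY_5", 5), ("SAMBANOVA_API_KEY_6", 6),
       ("SAMBANOVA_API_KEY_7", 7), ("SAMBANOVA_API_KEY_8", 8), ("SAMBANOVA_API_KEY_9", 9),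
       ("SAMBANOVA_API_KEY_10", 10), ("SAMBANOVA_API_KEY_11", 11), ("SAMBANOVA_API_KEY_12", 12),
       ("SAMBANOVA_API_KEY_13", 13), ("SAMBANOVA_API_KEY_14", 14), ("SAMBANOVA_API_KEY_15", 15),
       ("SAMBANOVA_API_KEY_16", 16), ("SAMBANOVA_API_KEY_17", 17), ("SAMBANOVA_API_KEY_18", 18),
       ("SAMBANOVA_API_KEY_19", 19), ("SAMBANOVA_API_KEY_20", 20), ("SAMBANOVA_API_KEY_21", 21),
       ("SAMBANOVA_API_KEY_22", 22), ("SAMBANOVA_API_KEY_23", 23), ("SAMBANOVA_API_KEY_24", 24),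
       ("SAMBANOVA_API_KEY_25", 25), ("SAMBANOVA_API_KEY_26", 26), ("SAMBANOVA_API_KEY_27", 27),
       ("SAMBANOVA_API_KEY_28", 28), ("SAMBANOVA_API_KEY_29", 29)] := by decide

-- the slot table is exactly the inverse of pvName on {0} ∪ [2, 30)
theorem pv_slot_iff (k : String) (i : Int) :
    pvSlotTable.get? k = some i ↔ (k = pvName i ∧ (i = 0 ∨ (2 ≤ i ∧ i < 30))) := by
  constructor
  · intro h
    have hm := PySem.Dict.mem_items_of_get?_eq_some pvSlotTable h
    rw [pv_slotTable_items] at hm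
    fin_cases hm <;> exact ⟨by decide, by omega⟩
  · rintro ⟨rfl, h0 | ⟨h2, h30⟩⟩
    · subst h0; decide
    · interval_cases i <;> decide

theorem pv_mk_get? (l : List (String × String)) (s : String) :
    (PySem.Dict.mk l).get? s =
      (l.filterMap (fun kv => if kv.1 = s then some kv.2 else none)).head? := by
  induction l with
  | nil => rfl
  | cons kv rest ih =>
      rcases kv with ⟨k, v⟩
      rw [PySem.Dict.get?_mk_cons]
      by_cases h : k = s
      · simp [h]
      · simp [h, ih]

theorem pv_fold_get? (l : List (String × String)) (d : PySem.Dict Int String) (i : Int) :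
    (l.foldl pvRoute d).get? i =
      (d.get? i).or
        ((l.filterMap (fun kv => if pvSlotTable.get? kv.1 = some i then some kv.2 else none)).head?) := by
  induction l generalizing d with
  | nil => simp
  | cons kv rest ih =>
      rw [List.foldl_cons, ih]
      rcases h : pvSlotTable.get? kv.1 with _ | j
      · have hstep : pvRoute d kv = d := by simp [pvRoute, h]
        simp [hstep, h]
      · have hstep : pvRoute d kv = d.setdefault j kv.2 := by simp [pvRoute, h]
        rw [hstep]
        by_cases hij : i = j
        · subst hij
          rw [PySem.Dict.get?_setdefault_self]
          rcases hd : d.get? i with _ | w <;> simp [h]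
        · have hget : (d.setdefault j kv.2).get? i = d.get? i := by
            rcases hc : d.contains j with _ | _
            · rw [PySem.Dict.setdefault_of_not_contains d kv.2 hc,
                PySem.Dict.get?_insert_of_ne d kv.2 hij]
            · rw [PySem.Dict.setdefault_of_contains d kv.2 hc]
          rw [hget]
          have hne : ¬ (some j = some i) := by
            intro hsome; exact hij (Option.some.inj hsome).symm
          simp [h, hne]

-- the routed dict reads back exactly what A's per-name lookups fetch
theorem pv_found_getD (config : List (String × String)) (i : Int)
    (hi : i = 0 ∨ (2 ≤ i ∧ i < 30)) :
    (config.foldl pvRoute PySem.Dict.empty).getD i "" =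
      (PySem.Dict.mk config).getD (pvName i) "" := by
  rw [PySem.Dict.getD_eq_get?_getD, PySem.Dict.getD_eq_get?_getD,
    pv_fold_get?, pv_mk_get?, PySem.Dict.get?_empty, Option.none_or]
  have hfun : (fun kv : String × String =>
      if pvSlotTable.get? kv.1 = some i then some kv.2 else none) =
      (fun kv : String × String => if kv.1 = pvName i then some kv.2 else none) := by
    funext kv
    by_cases h : pvSlotTable.get? kv.1 = some i
    · rw [if_pos h, if_pos ((pv_slot_iff kv.1 i).1 h).1]
    · rw [if_neg h, if_neg (fun hk => h ((pv_slot_iff kv.1 i).2 ⟨hk, hi⟩))]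
  rw [hfun]

theorem pv_found_one (config : List (String × String)) :
    (config.foldl pvRoute PySem.Dict.empty).getD 1 "" = "" := by
  rw [PySem.Dict.getD_eq_get?_getD, pv_fold_get?, PySem.Dict.get?_empty, Option.none_or]
  have hfun : ∀ kv : String × String,
      (if pvSlotTable.get? kv.1 = some 1 then some kv.2 else none) = (none : Option String) := by
    intro kv
    rw [if_neg]
    intro h
    rcases ((pv_slot_iff kv.1 1).1 h).2 with h0 | h2 <;> omega
  simp [List.filterMap_eq_nil_iff.2 (fun kv _ => hfun kv)]

-- B's out/seen fold computes A's membership fold, given seen ≈ out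
theorem pv_dedup_fold (vs : List String) :
    ∀ (out seen : List String), (∀ x, PySem.Set.contains seen x = true ↔ x ∈ out) →
      (vs.foldl pvB (out, seen)).1 = vs.foldl pvA out := by
  induction vs with
  | nil => intro out seen _; rfl
  | cons v rest ih =>
      intro out seen hinv
      rw [List.foldl_cons, List.foldl_cons]
      by_cases hv : v ≠ "" ∧ 32 ≤ PySem.Str.len v
      · by_cases hm : v ∈ out
        · have hA : pvA out v = out := by
            unfold pvA; rw [if_neg]; intro h; exact h.2.2 hm
          have hc : PySem.Set.contains seen v = true := (hinv v).2 hm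
          have hB : pvB (out, seen) v = (out, seen) := by
            unfold pvB; rw [if_neg]; intro h; rw [hc] at h; exact absurd h.2.2 (by simp)
          rw [hA, hB]; exact ih out seen hinv
        · have hA : pvA out v = out ++ [v] := by
            unfold pvA; rw [if_pos ⟨hv.1, hv.2, hm⟩]
          have hc : PySem.Set.contains seen v = false := by
            rcases h : PySem.Set.contains seen v with _ | _
            · rfl
            · exact absurd ((hinv v).1 h) hm
          have hB : pvB (out, seen) v = (out ++ [v], PySem.Set.add seen v) := by
            unfold pvB; rw [if_pos ⟨hv.1, hv.2, hc⟩]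
          rw [hA, hB]
          refine ih (out ++ [v]) (PySem.Set.add seen v) (fun x => ?_)
          rw [PySem.Set.contains_iff, PySem.Set.mem_add]
          simp [(hinv x).symm, or_comm]
      · have hA : pvA out v = out := by
          unfold pvA; rw [if_neg]; intro h; exact hv ⟨h.1, h.2.1⟩
        have hB : pvB (out, seen) v = (out, seen) := by
          unfold pvB; rw [if_neg]; intro h; exact hv ⟨h.1, h.2.1⟩
        rw [hA, hB]; exact ih out seen hinv

-- ===== VERDICT (by name: the statement is the Claim_ definition above) =====
theorem get_sambanova_keys_spec : Claim_equal_get_sambanova_keys := by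
  intro config _
  show get_sambanova_keys config = get_sambanova_keys_alt config
  set g : Int → String := fun i => (PySem.Dict.mk config).getD (pvName i) "" with hg
  set found : PySem.Dict Int String := config.foldl pvRoute PySem.Dict.empty with hfound
  set h : Int → String := fun i => found.getD i "" with hh
  -- A's result, as a pvA-fold over the fetched values
  have hA : get_sambanova_keys config =
      ((PySem.List.pyRange 2 30 1).map g).foldl pvA (pvA [] (g 0)) := by
    rw [List.foldl_map]
    simp only [get_sambanova_keys]
    have h0 : (PySem.Dict.mk config).getD "SAMBANOVA_API_KEY" "" = g 0 := by
      simp [hg, pvName]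
    rw [h0]
    have hinit : (if g 0 ≠ "" ∧ 32 ≤ PySem.Str.len (g 0) then [] ++ [g 0] else []) =
        pvA [] (g 0) := by
      unfold pvA
      by_cases hc : g 0 ≠ "" ∧ 32 ≤ PySem.Str.len (g 0)
      · rw [if_pos hc, if_pos ⟨hc.1, hc.2, by simp⟩]
      · rw [if_neg hc, if_neg (fun hc' => hc ⟨hc'.1, hc'.2.1⟩)]
    rw [hinit]
    refine PySem.List.foldl_congr_mem _ _ _ _ (fun keys i hi => ?_)
    have hne : ¬ (i = 0) := by
      have := PySem.List.mem_pyRange_one.1 hi; omega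
    simp [pvA, hg, pvName, hne]
  -- B's result, as a pvB-fold over the slot readouts
  have hB : get_sambanova_keys_alt config =
      (((PySem.List.pyRange 0 30 1).map h).foldl pvB ([], PySem.Set.empty)).1 := by
    rw [List.foldl_map]
    rfl
  rw [hA, hB, pv_dedup_fold _ [] PySem.Set.empty (by simp [PySem.Set.empty])]
  have hidx : PySem.List.pyRange 0 30 1 = 0 :: 1 :: PySem.List.pyRange 2 30 1 := by decide
  rw [hidx, List.map_cons, List.map_cons]
  have h1 : h 1 = "" := pv_found_one config
  have h0 : h 0 = g 0 := pv_found_getD config 0 (Or.inl rfl)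
  have hmap : (PySem.List.pyRange 2 30 1).map h = (PySem.List.pyRange 2 30 1).map g := by
    refine List.map_congr_left (fun i hi => ?_)
    have := PySem.List.mem_pyRange_one.1 hi
    exact pv_found_getD config i (Or.inr ⟨this.1, this.2⟩)
  rw [h1, h0, hmap, List.foldl_cons, List.foldl_cons]
  have hskip : pvA (pvA [] (g 0)) "" = pvA [] (g 0) := by
    unfold pvA; rw [if_neg]; intro hc; exact hc.1 rfl
  rw [hskip]
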